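-- pv_equiv track=rewrite | github.com/khiembk/optimize-plan-scheduling | simplex_method.py | find_min_negative_column_lr
-- ===== SOURCE A (Python) =====
-- def find_min_negative_column_lr(lastRow):
--     min_value = 0
--     min_index = -1
--     for index in range(len(lastRow)):
--         if lastRow[index] < min_value:
--             min_value = lastRow[index]
--             min_index = index
--     return min_index
-- ===== SOURCE B (Python) =====
-- def find_min_negative_column_lr(lastRow):
--     if not lastRow:
--         return -1
--     m = min(lastRow)
--     if m < 0:
--         return lastRow.index(m)
--     return -1
-- ===== Notes on version B (the rewrite author's own statement) =====
-- stated objective: simpler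
-- what changed: Replaced A's single fused argmin-with-threshold index loop by two library passes: compute m = min(lastRow) and, if m < 0, return lastRow.index(m) (first occurrence), else -1.
import Mathlib
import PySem

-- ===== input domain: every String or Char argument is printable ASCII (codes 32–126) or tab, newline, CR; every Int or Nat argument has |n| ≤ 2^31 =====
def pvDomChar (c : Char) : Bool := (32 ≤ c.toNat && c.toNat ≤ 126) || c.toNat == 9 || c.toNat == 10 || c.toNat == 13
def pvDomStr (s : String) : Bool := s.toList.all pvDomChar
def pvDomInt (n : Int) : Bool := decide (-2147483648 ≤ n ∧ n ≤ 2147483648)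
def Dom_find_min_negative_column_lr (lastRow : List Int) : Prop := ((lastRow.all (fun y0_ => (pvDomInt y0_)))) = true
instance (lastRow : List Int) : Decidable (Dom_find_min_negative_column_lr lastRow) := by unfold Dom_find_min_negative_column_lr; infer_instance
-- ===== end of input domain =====

-- B replaces A's fused argmin-with-threshold loop by min() followed by list.index(); objective: simpler.


-- ===== PORT A =====
-- for index in range(len(lastRow)): lastRow[index] — iterated as the enumerated list
def find_min_negative_column_lr (lastRow : List Int) : Int :=
  ((PySem.List.enumerate lastRow 0).foldl
    (fun (st : Int × Int) p => if p.2 < st.1 then (p.2, p.1) else st)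
    (0, -1)).2

-- ===== PORT B =====
def find_min_negative_column_lr_alt (lastRow : List Int) : Int :=
  match PySem.List.min? lastRow (fun y => y) with
  | none => -1                 -- empty list
  | some m =>
    if m < 0 then
      match PySem.List.index? lastRow m with
      | some k => (k : Int)
      | none => -1             -- unreachable: m ∈ lastRow
    else -1

-- ===== PRECONDITION & SPEC =====
def Spec_find_min_negative_column_lr (lastRow : List Int) (out : Int) : Prop := out = find_min_negative_column_lr_alt lastRow
instance (lastRow : List Int) (out : Int) : Decidable (Spec_find_min_negative_column_lr lastRow out) := by unfold Spec_find_min_negative_column_lr; infer_instance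

-- ===== CLAIM (what is proved, stated in full; the proofs are below) =====
def Claim_equal_find_min_negative_column_lr : Prop := ∀ (lastRow : List Int), Dom_find_min_negative_column_lr lastRow → Spec_find_min_negative_column_lr lastRow (find_min_negative_column_lr lastRow)

-- ===== LEMMAS AND PROOFS =====

-- recursive first-minimum used only to characterise both ports
def pvMinRec : List Int → Option Int
  | [] => none
  | x :: t =>
    match pvMinRec t with
    | none => some x
    | some m => some (if x ≤ m then x else m)

theorem pvMinRec_eq_none {l : List Int} (h : pvMinRec l = none) : l = [] := by
  cases l with
  | nil => rfl
  | cons x t => simp only [pvMinRec] at h; cases hb : pvMinRec t <;> simp [hb] at h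

theorem pvMinRec_mem : ∀ (l : List Int) (m : Int), pvMinRec l = some m → m ∈ l := by
  intro l
  induction l with
  | nil => intro m h; simp [pvMinRec] at h
  | cons x t ih =>
    intro m h
    simp only [pvMinRec] at h
    cases ht : pvMinRec t with
    | none => rw [ht] at h; simp_all
    | some mt =>
      rw [ht] at h
      simp only [Option.some.injEq] at h
      by_cases hx : x ≤ mt
      · simp [hx] at h; simp [← h]
      · simp [hx] at h; exact List.mem_cons_of_mem _ (h ▸ ih mt ht)

theorem pvFoldl_min_eq : ∀ (t : List Int) (x : Int),
    t.foldl min x = match pvMinRec t with | none => x | some m => min x m := by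
  intro t
  induction t with
  | nil => intro x; simp [pvMinRec]
  | cons y t' ih =>
    intro x
    simp only [List.foldl_cons, pvMinRec]
    rw [ih]
    cases h : pvMinRec t' with
    | none => simp
    | some m =>
      simp only [min_def]
      split_ifs <;> omega

theorem pvMin?_eq_minRec (l : List Int) :
    PySem.List.min? l (fun y => y) = pvMinRec l := by
  cases l with
  | nil => simp [PySem.List.min?_eq_none_iff, pvMinRec]
  | cons x t =>
    rw [PySem.List.min?_id_cons, pvFoldl_min_eq]
    cases h : pvMinRec t with
    | none => rw [pvMinRec_eq_none h]; simp [pvMinRec]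
    | some m =>
      simp only [pvMinRec, h, min_def]

-- characterisation of A's loop from an arbitrary start index and accumulator
theorem pvFoldA_char : ∀ (l : List Int) (k mv mi : Int),
    (PySem.List.enumerate l k).foldl
      (fun (st : Int × Int) p => if p.2 < st.1 then (p.2, p.1) else st) (mv, mi)
    = match pvMinRec l with
      | none => (mv, mi)
      | some m =>
        if m < mv then (m, k + ((PySem.List.index? l m).getD 0 : Nat)) else (mv, mi) := by
  intro l
  induction l with
  | nil => intro k mv mi; simp [PySem.List.enumerate_nil, pvMinRec]
  | cons x t ih =>
    intro k mv mi
    rw [PySem.List.enumerate_cons]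
    simp only [List.foldl_cons]
    cases ht : pvMinRec t with
    | none =>
      rw [pvMinRec_eq_none ht]
      simp only [pvMinRec, PySem.List.enumerate_nil, List.foldl_nil]
      by_cases hx : x < mv
      · rw [PySem.List.index?_cons_self]
        simp [hx]
      · simp [hx]
    | some m =>
      by_cases hx : x < mv
      · simp only [hx, if_true]
        rw [ih]
        simp only [pvMinRec, ht]
        by_cases hm : x ≤ m
        · have h1 : ¬ m < x := by omega
          rw [if_pos hm, if_neg h1, PySem.List.index?_cons_self]
          simp [hx]
        · have hmx : m < x := by omega
          have hne : x ≠ m := by omega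
          have hmmv : m < mv := by omega
          rw [if_neg hm, if_pos hmx, PySem.List.index?_cons_of_ne t hne, if_pos hmmv]
          obtain ⟨j, hj⟩ : ∃ j, PySem.List.index? t m = some j :=
            Option.isSome_iff_exists.mp
              ((PySem.List.index?_isSome_iff t m).mpr (pvMinRec_mem t m ht))
          rw [hj]
          simp only [Option.map_some, Option.getD_some, Prod.mk.injEq]
          refine ⟨by trivial, by push_cast; omega⟩
      · simp only [hx, if_false]
        rw [ih]
        simp only [pvMinRec, ht]
        by_cases hm : x ≤ m
        · have h1 : ¬ m < mv := by omega
          rw [if_pos hm, if_neg hx, if_neg h1]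
        · have hmx : m < x := by omega
          have hne : x ≠ m := by omega
          rw [if_neg hm, PySem.List.index?_cons_of_ne t hne]
          by_cases hmmv : m < mv
          · rw [if_pos hmmv, if_pos hmmv]
            obtain ⟨j, hj⟩ : ∃ j, PySem.List.index? t m = some j :=
              Option.isSome_iff_exists.mp
                ((PySem.List.index?_isSome_iff t m).mpr (pvMinRec_mem t m ht))
            rw [hj]
            simp only [Option.map_some, Option.getD_some, Prod.mk.injEq]
            refine ⟨by trivial, by push_cast; omega⟩
          · rw [if_neg hmmv, if_neg hmmv]

-- ===== VERDICT (by name: the statement is the Claim_ definition above) =====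
theorem find_min_negative_column_lr_spec : Claim_equal_find_min_negative_column_lr := by
  intro lastRow _
  unfold Spec_find_min_negative_column_lr find_min_negative_column_lr find_min_negative_column_lr_alt
  rw [pvFoldA_char, pvMin?_eq_minRec]
  cases h : pvMinRec lastRow with
  | none => simp
  | some m =>
    by_cases hm : m < 0
    · obtain ⟨j, hj⟩ : ∃ j, PySem.List.index? lastRow m = some j :=
        Option.isSome_iff_exists.mp
          ((PySem.List.index?_isSome_iff lastRow m).mpr (pvMinRec_mem lastRow m h))
      rw [PySem.List.index?_eq_idxOf?] at hj
      simp [hm, hj]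
    · simp [hm]
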